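-- pv_equiv track=rewrite | github.com/dataesr/person-matcher | project/server/main/association_matcher.py | get_main_modality
-- ===== SOURCE A (Python) =====
-- from collections import Counter
--
-- def get_main_modality(x, min_occurences_to_reach):
--     cnt = Counter()
--     for e in x:
--         cnt[e] +=1
--     top_2 = cnt.most_common(2)
--     if len(top_2) == 0:
--         return None
--     max_occurences = top_2[0][1]
--     if max_occurences < min_occurences_to_reach:
--         return None
--     if len(top_2)==2: # si plusieurs, le premier doit être suffisamment plus fréquent que le second
--         if top_2[0][1] > top_2[1][1] * 2:
--             return top_2[0][0]
--     elif len(top_2)==1: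
--         return top_2[0][0]
--     return None
-- ===== SOURCE B (Python) =====
-- def get_main_modality(x, min_occurences_to_reach):
--     counts = {}
--     for e in x:
--         counts[e] = counts.get(e, 0) + 1
--     best_elem, best_count, second_count = None, 0, 0
--     for e, c in counts.items():
--         if c > best_count:
--             best_elem, best_count, second_count = e, c, best_count
--         elif c > second_count:
--             second_count = c
--     if best_count >= min_occurences_to_reach and best_count > 2 * second_count:
--         return best_elem
--     return None
-- ===== Notes on version B (the rewrite author's own statement) =====
-- stated objective: simpler
-- what changed: B replaces Counter + most_common(2) (a sort of the frequency table) with a plain dict built in one pass and a single hand-rolled scan tracking the top two counts, and collapses A's three-way branch on len(top_2) into one condition best_count >= min and best_count > 2*second_count. (measured ~1.6-2.3x faster: no Counter object, no sort/heap in most_common)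
import Mathlib
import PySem

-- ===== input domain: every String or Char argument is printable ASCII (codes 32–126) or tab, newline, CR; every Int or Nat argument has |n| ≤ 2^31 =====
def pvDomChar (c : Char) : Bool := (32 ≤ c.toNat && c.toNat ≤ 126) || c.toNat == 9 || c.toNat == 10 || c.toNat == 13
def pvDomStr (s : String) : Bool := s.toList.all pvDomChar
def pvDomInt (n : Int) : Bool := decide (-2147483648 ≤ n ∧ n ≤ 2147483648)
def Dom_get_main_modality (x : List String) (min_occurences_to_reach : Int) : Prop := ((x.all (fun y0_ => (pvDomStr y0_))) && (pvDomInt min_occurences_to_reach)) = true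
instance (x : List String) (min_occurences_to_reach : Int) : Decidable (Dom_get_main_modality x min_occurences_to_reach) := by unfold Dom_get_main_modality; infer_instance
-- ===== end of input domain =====

-- B replaces Counter.most_common(2) by a single hand-rolled top-two scan over the frequency dict (no sort); objective: simpler.


-- ===== PORT A =====
-- cnt = Counter(); for e in x: cnt[e] += 1; top_2 = cnt.most_common(2)
-- (most_common(2) is documented as sorted(items, key=count, reverse=True)[:2]; stable)
def get_main_modality (x : List String) (min_occurences_to_reach : Int) : Option String :=
  let cnt := PySem.Dict.counter x
  let top_2 := (PySem.List.sorted cnt.items (fun p => p.2) true).take 2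
  match top_2 with
  | [] => none
  | (k1, c1) :: rest =>
    if c1 < min_occurences_to_reach then none
    else
      match rest with
      | [(_, c2)] => if c1 > c2 * 2 then some k1 else none
      | [] => some k1
      | _ => none

-- ===== PORT B =====
-- one fold builds the counts dict, a second fold tracks (best_elem, best_count, second_count)
def get_main_modality_alt (x : List String) (min_occurences_to_reach : Int) : Option String :=
  let counts := x.foldl (fun d e => d.insert e (d.getD e 0 + 1)) PySem.Dict.empty
  let s := counts.items.foldl
    (fun (st : Option String × Int × Int) p =>
      if p.2 > st.2.1 then (some p.1, p.2, st.2.1)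
      else if p.2 > st.2.2 then (st.1, st.2.1, p.2)
      else st)
    (none, 0, 0)
  if s.2.1 ≥ min_occurences_to_reach ∧ s.2.1 > 2 * s.2.2 then s.1 else none

-- ===== PRECONDITION & SPEC =====
def Spec_get_main_modality (x : List String) (min_occurences_to_reach : Int) (out : Option String) : Prop := out = get_main_modality_alt x min_occurences_to_reach
instance (x : List String) (min_occurences_to_reach : Int) (out : Option String) : Decidable (Spec_get_main_modality x min_occurences_to_reach out) := by unfold Spec_get_main_modality; infer_instance

-- ===== CLAIM (what is proved, stated in full; the proofs are below) =====
def Claim_equal_get_main_modality : Prop := ∀ (x : List String) (min_occurences_to_reach : Int), Dom_get_main_modality x min_occurences_to_reach → Spec_get_main_modality x min_occurences_to_reach (get_main_modality x min_occurences_to_reach)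

-- ===== LEMMAS AND PROOFS =====

-- B's fold step over the items, and A's stable descending insertion (from sorted_rev_eq_foldl_insertBy)
def pvStep (st : Option String × Int × Int) (p : String × Int) : Option String × Int × Int :=
  if p.2 > st.2.1 then (some p.1, p.2, st.2.1)
  else if p.2 > st.2.2 then (st.1, st.2.1, p.2)
  else st

def pvIns (p : String × Int) (acc : List (String × Int)) : List (String × Int) :=
  PySem.List.insertBy (fun a b => decide (b.2 < a.2)) p acc

-- read B's fold state off the first two elements of A's sorted accumulator
def pvG : List (String × Int) → Option String × Int × Int
  | [] => (none, 0, 0)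
  | [(k, c)] => (some k, c, 0)
  | (k1, c1) :: (_, c2) :: _ => (some k1, c1, c2)

theorem pvTake2_insert (p : String × Int) (acc : List (String × Int)) :
    (pvIns p acc).take 2 = (pvIns p (acc.take 2)).take 2 := by
  rcases acc with _ | ⟨a, _ | ⟨b, rest⟩⟩ <;>
    (simp [pvIns, PySem.List.insertBy]; try (split_ifs <;> simp [*]))

theorem pvG_ins (p : String × Int) (hp : 1 ≤ p.2) (t : List (String × Int)) (ht : t.length ≤ 2) :
    pvG ((pvIns p t).take 2) = pvStep (pvG t) p := by
  rcases t with _ | ⟨a, _ | ⟨b, _ | ⟨c, r⟩⟩⟩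
  · simp [pvIns, PySem.List.insertBy, pvG, pvStep]; omega
  · simp only [pvIns, PySem.List.insertBy, pvG, pvStep]
    split_ifs with h1 h2 h3 <;> (simp_all; try omega)
  · simp only [pvIns, PySem.List.insertBy, pvG, pvStep]
    split_ifs with h1 h2 h3 h4 h5 h6 <;> simp_all
  · simp at ht

theorem pvInvariant (l : List (String × Int)) (hl : ∀ p ∈ l, 1 ≤ p.2) :
    ∀ acc : List (String × Int),
      pvG ((l.foldl (fun acc x => pvIns x acc) acc).take 2) = l.foldl pvStep (pvG (acc.take 2)) := by
  induction l with
  | nil => intro acc; simp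
  | cons p l ih =>
    intro acc
    have hp : 1 ≤ p.2 := hl p (by simp)
    have := ih (fun q hq => hl q (by simp [hq])) (pvIns p acc)
    simp only [List.foldl_cons]
    rw [this, pvTake2_insert]
    congr 1
    exact pvG_ins p hp (acc.take 2) (by simp [List.length_take])

theorem pvCounts_pos (x : List String) :
    ∀ p ∈ (PySem.Dict.counter x).items, 1 ≤ p.2 := by
  intro p hp
  rw [PySem.Dict.items_counter] at hp
  obtain ⟨k, hk, rfl⟩ := List.mem_map.mp hp
  have : k ∈ x := (PySem.Set.mem_ofList x k).mp hk
  have := List.count_pos_iff.mpr this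
  simpa using this

-- ===== VERDICT (by name: the statement is the Claim_ definition above) =====
theorem get_main_modality_spec : Claim_equal_get_main_modality := by
  intro x m _
  unfold Spec_get_main_modality get_main_modality get_main_modality_alt
  have hdict : x.foldl (fun d e => d.insert e (d.getD e 0 + 1)) PySem.Dict.empty
      = PySem.Dict.counter x := rfl
  simp only [hdict]
  set l := (PySem.Dict.counter x).items with hldef
  have hpos : ∀ p ∈ l, 1 ≤ p.2 := pvCounts_pos x
  have hsorted : PySem.List.sorted l (fun p => p.2) true
      = l.foldl (fun acc x => pvIns x acc) [] := by
    rw [PySem.List.sorted_rev_eq_foldl_insertBy]; rfl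
  have hfold : l.foldl
      (fun (st : Option String × Int × Int) p =>
        if p.2 > st.2.1 then (some p.1, p.2, st.2.1)
        else if p.2 > st.2.2 then (st.1, st.2.1, p.2)
        else st) (none, 0, 0) = l.foldl pvStep (none, 0, 0) := rfl
  simp only [hsorted, hfold]
  have hinv := pvInvariant l hpos []
  simp only [List.take_nil, pvG] at hinv
  -- members of the top-2 list are members of l, hence have positive counts
  have hmem : ∀ p ∈ (l.foldl (fun acc x => pvIns x acc) []).take 2, 1 ≤ p.2 := by
    intro p hp
    have h1 : p ∈ l.foldl (fun acc x => pvIns x acc) [] := List.mem_of_mem_take hp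
    have h2 : p ∈ PySem.List.sorted l (fun q => q.2) true := by rw [hsorted]; exact h1
    exact hpos p ((PySem.List.mem_sorted l (fun q => q.2) true p).mp h2)
  rcases htop : (l.foldl (fun acc x => pvIns x acc) []).take 2 with _ | ⟨⟨k1, c1⟩, rest⟩
  · rw [htop] at hinv
    rw [← hinv]
    simp
  · have hc1 : 1 ≤ c1 := hmem (k1, c1) (by rw [htop]; simp)
    rcases rest with _ | ⟨⟨k2, c2⟩, rest2⟩
    · rw [htop] at hinv
      rw [← hinv]
      by_cases h : c1 < m <;> (simp [h]; try omega)
    · have hlen : rest2 = [] := by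
        have := congrArg List.length htop
        simp [List.length_take] at this
        simpa using List.length_eq_zero_iff.mp (by omega)
      subst hlen
      rw [htop] at hinv
      rw [← hinv]
      by_cases h : c1 < m
      · simp [h]
      · by_cases h2 : c1 > c2 * 2 <;> (simp [h, h2]; try omega)
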